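-- pv_equiv track=rewrite | github.com/OfiliPatrick/python-algos | Misc/GS/MinEnergy.py | minEnergy
-- ===== SOURCE A (Python) =====
-- def minEnergy(arr):
--     ini_min_energy = 0
--     curr_energy = 0
--     energy_drop = False
--
--     for i in range(len(arr)):
--         curr_energy += arr[i]
--         if curr_energy <= 0:
--             ini_min_energy += abs(curr_energy) + 1
--             curr_energy =1
--             energy_drop = True
--
--
--     # return 3
--     return 1 if not energy_drop else ini_min_energy
-- ===== SOURCE B (Python) =====
-- def minEnergy(arr):
--     run = 0
--     mn = None
--     for x in arr:
--         run += x
--         if mn is None or run < mn: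
--             mn = run
--     if mn is None or mn > 0:
--         return 1
--     return 1 - mn
-- ===== Notes on version B (the rewrite author's own statement) =====
-- stated objective: simpler
-- what changed: Replaces the greedy reset-and-top-up simulation (accumulated top-ups, curr_energy reset to 1, energy_drop flag) with a single min-prefix-sum pass and the closed form 1 - min_prefix (or 1 if the minimum prefix is positive or the list is empty).
import Mathlib
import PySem

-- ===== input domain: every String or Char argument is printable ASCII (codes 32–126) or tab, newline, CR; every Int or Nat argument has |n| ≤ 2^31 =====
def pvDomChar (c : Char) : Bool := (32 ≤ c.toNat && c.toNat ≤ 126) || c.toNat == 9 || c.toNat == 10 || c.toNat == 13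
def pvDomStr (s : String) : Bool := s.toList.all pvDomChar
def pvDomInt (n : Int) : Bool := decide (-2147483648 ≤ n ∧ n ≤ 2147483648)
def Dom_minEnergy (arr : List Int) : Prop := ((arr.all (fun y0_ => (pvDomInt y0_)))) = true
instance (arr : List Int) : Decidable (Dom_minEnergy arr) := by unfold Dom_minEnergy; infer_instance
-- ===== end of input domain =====

-- B replaces A's greedy reset-and-top-up simulation with a min-prefix-sum pass and a
-- closed-form final answer (simpler; same O(n) cost).

-- ===== PORT A =====
-- state: (ini_min_energy, curr_energy, energy_drop); the for-loop over range(len(arr))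
-- reads arr[i] in order, so it is a foldl over the list.
def minEnergy (arr : List Int) : Int :=
  let s := arr.foldl
    (fun (st : Int × Int × Bool) x =>
      let curr := st.2.1 + x
      if curr ≤ 0 then (st.1 + |curr| + 1, 1, true) else (st.1, curr, st.2.2))
    (0, 0, false)
  if s.2.2 then s.1 else 1

-- ===== PORT B =====
-- state: (run, mn) with mn = min prefix sum so far (none while no element seen).
def minEnergy_alt (arr : List Int) : Int :=
  let p := arr.foldl
    (fun (st : Int × Option Int) x =>
      let run := st.1 + x
      (run, match st.2 with
            | none => some run
            | some m => some (if run < m then run else m)))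
    (0, none)
  match p.2 with
  | none => 1
  | some m => if m > 0 then 1 else 1 - m

-- ===== PRECONDITION & SPEC =====
def Spec_minEnergy (arr : List Int) (out : Int) : Prop := out = minEnergy_alt arr
instance (arr : List Int) (out : Int) : Decidable (Spec_minEnergy arr out) := by unfold Spec_minEnergy; infer_instance

-- ===== CLAIM (what is proved, stated in full; the proofs are below) =====
def Claim_equal_minEnergy : Prop := ∀ (arr : List Int), Dom_minEnergy arr → Spec_minEnergy arr (minEnergy arr)

-- ===== LEMMAS AND PROOFS =====

-- The invariant tying A's state to B's state after any common prefix.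
def MEInv (st : Int × Int × Bool) (p : Int × Option Int) : Prop :=
  st.2.1 = p.1 + st.1 ∧
  (match st.2.2, p.2 with
   | false, none => st.1 = 0
   | false, some m => st.1 = 0 ∧ 0 < m
   | true, some m => st.1 = 1 - m ∧ m ≤ 0
   | true, none => False)

def stepA (st : Int × Int × Bool) (x : Int) : Int × Int × Bool :=
  let curr := st.2.1 + x
  if curr ≤ 0 then (st.1 + |curr| + 1, 1, true) else (st.1, curr, st.2.2)

def stepB (st : Int × Option Int) (x : Int) : Int × Option Int :=
  let run := st.1 + x
  (run, match st.2 with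
        | none => some run
        | some m => some (if run < m then run else m))

theorem stepA_eq (arr : List Int) (st : Int × Int × Bool) :
    arr.foldl (fun (st : Int × Int × Bool) x =>
      let curr := st.2.1 + x
      if curr ≤ 0 then (st.1 + |curr| + 1, 1, true) else (st.1, curr, st.2.2)) st
    = arr.foldl stepA st := rfl

theorem stepB_eq (arr : List Int) (st : Int × Option Int) :
    arr.foldl (fun (st : Int × Option Int) x =>
      let run := st.1 + x
      (run, match st.2 with
            | none => some run
            | some m => some (if run < m then run else m))) st
    = arr.foldl stepB st := rfl

theorem inv_step (st : Int × Int × Bool) (p : Int × Option Int) (x : Int)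
    (h : MEInv st p) : MEInv (stepA st x) (stepB p x) := by
  obtain ⟨ini, curr, drop⟩ := st
  obtain ⟨run, mn⟩ := p
  obtain ⟨h1, h2⟩ := h
  simp only at h1
  simp only [stepA, stepB, MEInv]
  cases drop <;> cases mn <;> simp_all <;>
  · split_ifs <;> simp_all [abs_of_nonpos] <;> omega

theorem inv_fold (arr : List Int) (st : Int × Int × Bool) (p : Int × Option Int)
    (h : MEInv st p) : MEInv (arr.foldl stepA st) (arr.foldl stepB p) := by
  induction arr generalizing st p with
  | nil => exact h
  | cons x xs ih => exact ih _ _ (inv_step st p x h)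

-- ===== VERDICT (by name: the statement is the Claim_ definition above) =====
theorem minEnergy_spec : Claim_equal_minEnergy := by
  intro arr _
  unfold Spec_minEnergy minEnergy minEnergy_alt
  rw [stepA_eq, stepB_eq]
  have h := inv_fold arr (0, 0, false) (0, none) (by simp [MEInv])
  revert h
  generalize arr.foldl stepA (0, 0, false) = sa
  generalize arr.foldl stepB (0, none) = sb
  intro h
  obtain ⟨ini, curr, drop⟩ := sa
  obtain ⟨run, mn⟩ := sb
  obtain ⟨h1, h2⟩ := h
  cases drop with
  | false =>
    cases mn with
    | none => rfl
    | some m =>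
      have h2' : ini = 0 ∧ 0 < m := h2
      show (1 : Int) = if m > 0 then 1 else 1 - m
      rw [if_pos h2'.2]
  | true =>
    cases mn with
    | none => exact (h2 : False).elim
    | some m =>
      have h2' : ini = 1 - m ∧ m ≤ 0 := h2
      show ini = if m > 0 then (1 : Int) else 1 - m
      rw [if_neg (by omega), h2'.1]
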